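-- pv_equiv track=rewrite | github.com/kartikp36/project-euler | 45 Triangular, pentagonal, and hexagonal.py | inhexagonal
-- ===== SOURCE A (Python) =====
-- def inhexagonal(m,numb) :
--     z = 1
--     while z < m :
--         h = int(z*(2*z -1))
--         if numb == h :
--             return  True
--         z += 1
--     return False
-- ===== SOURCE B (Python) =====
-- def inhexagonal(m, numb):
--     # Binary search for an index z in [1, m-1] with z*(2*z-1) == numb;
--     # z*(2*z-1) is strictly increasing on z >= 1.
--     lo, hi = 1, m - 1
--     while lo <= hi:
--         mid = (lo + hi) // 2
--         h = mid * (2 * mid - 1)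
--         if h == numb:
--             return True
--         if h < numb:
--             lo = mid + 1
--         else:
--             hi = mid - 1
--     return False
-- ===== Notes on version B (the rewrite author's own statement) =====
-- stated objective: faster
-- what changed: Replaced A's linear scan of all hexagonal indices below m by a binary search over the index range [1, m-1], exploiting that z*(2z-1) is strictly increasing for z >= 1.
import Mathlib
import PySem

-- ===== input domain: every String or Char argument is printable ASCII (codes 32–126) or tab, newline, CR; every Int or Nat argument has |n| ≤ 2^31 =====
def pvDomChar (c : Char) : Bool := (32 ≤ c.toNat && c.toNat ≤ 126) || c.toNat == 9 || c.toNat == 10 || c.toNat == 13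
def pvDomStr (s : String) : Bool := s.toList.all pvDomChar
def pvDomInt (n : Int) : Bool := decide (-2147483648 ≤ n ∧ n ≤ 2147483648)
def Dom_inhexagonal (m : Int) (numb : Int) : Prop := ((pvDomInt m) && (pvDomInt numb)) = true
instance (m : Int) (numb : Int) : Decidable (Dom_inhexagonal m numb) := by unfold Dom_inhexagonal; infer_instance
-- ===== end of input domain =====

-- B replaces A's linear scan over hexagonal indices by a binary search on [1, m-1] (faster asymptotically).


-- ===== PORT A =====
-- A's while loop: z starts at 1, while z < m test numb == z*(2*z-1), else z += 1.
def inhexLoopA (m numb z : Int) : Bool :=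
  if z < m then
    if numb == z * (2 * z - 1) then true
    else inhexLoopA m numb (z + 1)
  else false
termination_by (m - z).toNat
decreasing_by omega

def inhexagonal (m : Int) (numb : Int) : Bool := inhexLoopA m numb 1

-- ===== PORT B =====
-- B's while loop: binary search for an index mid in [lo, hi] with mid*(2*mid-1) == numb.
def inhexLoopB (numb lo hi : Int) : Bool :=
  if lo ≤ hi then
    let mid := PySem.Int.floordiv (lo + hi) 2
    let h := mid * (2 * mid - 1)
    if h == numb then true
    else if h < numb then inhexLoopB numb (mid + 1) hi
    else inhexLoopB numb lo (mid - 1)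
  else false
termination_by (hi - lo + 1).toNat
decreasing_by
  · have := PySem.Int.floordiv_two_mid_bounds (by assumption : lo ≤ hi); omega
  · have := PySem.Int.floordiv_two_mid_bounds (by assumption : lo ≤ hi); omega

def inhexagonal_alt (m : Int) (numb : Int) : Bool := inhexLoopB numb 1 (m - 1)

-- ===== PRECONDITION & SPEC =====
def Spec_inhexagonal (m : Int) (numb : Int) (out : Bool) : Prop := out = inhexagonal_alt m numb
instance (m : Int) (numb : Int) (out : Bool) : Decidable (Spec_inhexagonal m numb out) := by unfold Spec_inhexagonal; infer_instance

-- ===== CLAIM (what is proved, stated in full; the proofs are below) =====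
def Claim_equal_inhexagonal : Prop := ∀ (m : Int) (numb : Int), Dom_inhexagonal m numb → Spec_inhexagonal m numb (inhexagonal m numb)

-- ===== LEMMAS AND PROOFS =====

-- f z = z*(2z-1) is monotone on z ≥ 1
lemma hex_mono {a b : Int} (ha : 1 ≤ a) (hab : a ≤ b) :
    a * (2 * a - 1) ≤ b * (2 * b - 1) := by nlinarith

-- A's loop returns true iff a matching index exists in [z, m)
lemma loopA_iff (m numb : Int) : ∀ z : Int,
    (inhexLoopA m numb z = true ↔ ∃ k : Int, z ≤ k ∧ k < m ∧ numb = k * (2 * k - 1)) := by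
  intro z
  induction z using inhexLoopA.induct m numb with
  | case1 z hlt heq =>
    rw [inhexLoopA, if_pos hlt, if_pos heq]
    simp only [true_iff]
    exact ⟨z, le_refl z, hlt, by exact_mod_cast (beq_iff_eq.mp heq)⟩
  | case2 z hlt hne ih =>
    rw [inhexLoopA, if_pos hlt, if_neg hne]
    rw [ih]
    constructor
    · rintro ⟨k, hk1, hk2, hk3⟩; exact ⟨k, by omega, hk2, hk3⟩
    · rintro ⟨k, hk1, hk2, hk3⟩
      refine ⟨k, ?_, hk2, hk3⟩
      have : numb ≠ z * (2 * z - 1) := by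
        intro h; exact hne (by exact_mod_cast beq_iff_eq.mpr h)
      have : k ≠ z := by intro h; subst h; exact this hk3
      omega
  | case3 z hlt =>
    rw [inhexLoopA, if_neg hlt]
    simp only [Bool.false_eq_true, false_iff, not_exists]
    rintro k ⟨hk1, hk2, _⟩; omega

-- B's loop returns true iff a matching index exists in [lo, hi], given 1 ≤ lo
lemma loopB_iff (numb : Int) : ∀ lo hi : Int, 1 ≤ lo →
    (inhexLoopB numb lo hi = true ↔ ∃ k : Int, lo ≤ k ∧ k ≤ hi ∧ numb = k * (2 * k - 1)) := by
  intro lo hi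
  induction lo, hi using inhexLoopB.induct numb with
  | case1 lo hi hle mid h heq =>
    intro _
    rw [inhexLoopB, if_pos hle]
    dsimp only
    rw [if_pos heq]
    have hb := PySem.Int.floordiv_two_mid_bounds hle
    simp only [true_iff]
    exact ⟨PySem.Int.floordiv (lo + hi) 2, hb.1, hb.2, (beq_iff_eq.mp heq).symm⟩
  | case2 lo hi hle mid h hne hlt ih =>
    intro hlo
    have hb := PySem.Int.floordiv_two_mid_bounds hle
    rw [inhexLoopB, if_pos hle]
    dsimp only
    rw [if_neg hne, if_pos hlt]
    rw [ih (by omega)]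
    constructor
    · rintro ⟨k, hk1, hk2, hk3⟩; exact ⟨k, by omega, hk2, hk3⟩
    · rintro ⟨k, hk1, hk2, hk3⟩
      refine ⟨k, ?_, hk2, hk3⟩
      -- k must exceed mid: f mid < numb = f k and f monotone on ≥ 1
      by_contra hcon
      have hkmid : k ≤ mid := by omega
      have : k * (2 * k - 1) ≤ mid * (2 * mid - 1) := hex_mono (by omega) hkmid
      omega
  | case3 lo hi hle mid h hne hge ih =>
    intro hlo
    have hb := PySem.Int.floordiv_two_mid_bounds hle
    rw [inhexLoopB, if_pos hle]
    dsimp only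
    rw [if_neg hne, if_neg hge]
    rw [ih hlo]
    constructor
    · rintro ⟨k, hk1, hk2, hk3⟩; exact ⟨k, hk1, by omega, hk3⟩
    · rintro ⟨k, hk1, hk2, hk3⟩
      refine ⟨k, hk1, ?_, hk3⟩
      by_contra hcon
      have hkmid : mid ≤ k := by omega
      have hmidnum : numb ≠ mid * (2 * mid - 1) := by
        intro hx; exact hne (beq_iff_eq.mpr hx.symm)
      have hnl : ¬ mid * (2 * mid - 1) < numb := hge
      have : mid * (2 * mid - 1) ≤ k * (2 * k - 1) := hex_mono (by omega) hkmid
      omega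
  | case4 lo hi hle =>
    intro _
    rw [inhexLoopB, if_neg hle]
    simp only [Bool.false_eq_true, false_iff, not_exists]
    rintro k ⟨hk1, hk2, _⟩; omega

-- ===== VERDICT (by name: the statement is the Claim_ definition above) =====
theorem inhexagonal_spec : Claim_equal_inhexagonal := by
  intro m numb _
  unfold Spec_inhexagonal inhexagonal inhexagonal_alt
  rw [Bool.eq_iff_iff, loopA_iff, loopB_iff numb 1 (m - 1) (le_refl 1)]
  constructor
  · rintro ⟨k, h1, h2, h3⟩; exact ⟨k, h1, by omega, h3⟩
  · rintro ⟨k, h1, h2, h3⟩; exact ⟨k, h1, by omega, h3⟩
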